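-- pv_equiv track=rewrite | github.com/RoryBarnes/vaibify | vaibify/reproducibility/manifestWriter.py | _fsUnescapeManifestPath
-- ===== SOURCE A (Python) =====
-- def _fsUnescapeManifestPath(sEscaped):
--     """Reverse the GNU escaping applied by ``_fsEscapeManifestPath``."""
--     listChars = []
--     iIndex = 0
--     while iIndex < len(sEscaped):
--         sChar = sEscaped[iIndex]
--         if sChar == "\\" and iIndex + 1 < len(sEscaped):
--             sNext = sEscaped[iIndex + 1]
--             if sNext == "n":
--                 listChars.append("\n")
--                 iIndex += 2
--                 continue
--             if sNext == "\\":
--                 listChars.append("\\")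
--                 iIndex += 2
--                 continue
--         listChars.append(sChar)
--         iIndex += 1
--     return "".join(listChars)
-- ===== SOURCE B (Python) =====
-- import re
--
-- def _fsUnescapeManifestPath(sEscaped):
--     """Reverse the GNU escaping applied by ``_fsEscapeManifestPath``."""
--     def repl(m):
--         c = m.group(1)
--         if c == "n":
--             return "\n"
--         if c == "\\":
--             return "\\"
--         return "\\" + c
--     return re.sub(r"\\(.)", repl, sEscaped, flags=re.DOTALL)
-- ===== Notes on version B (the rewrite author's own statement) =====
-- stated objective: idiomatic
-- what changed: Replaced the manual index/lookahead while-loop building a char list with a single re.sub pass over the pattern \\(.) (DOTALL) whose replacement function maps n to newline, backslash to backslash, and anything else to backslash+char; the scan runs in the C regex engine instead of a Python bytecode loop.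
import Mathlib
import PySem

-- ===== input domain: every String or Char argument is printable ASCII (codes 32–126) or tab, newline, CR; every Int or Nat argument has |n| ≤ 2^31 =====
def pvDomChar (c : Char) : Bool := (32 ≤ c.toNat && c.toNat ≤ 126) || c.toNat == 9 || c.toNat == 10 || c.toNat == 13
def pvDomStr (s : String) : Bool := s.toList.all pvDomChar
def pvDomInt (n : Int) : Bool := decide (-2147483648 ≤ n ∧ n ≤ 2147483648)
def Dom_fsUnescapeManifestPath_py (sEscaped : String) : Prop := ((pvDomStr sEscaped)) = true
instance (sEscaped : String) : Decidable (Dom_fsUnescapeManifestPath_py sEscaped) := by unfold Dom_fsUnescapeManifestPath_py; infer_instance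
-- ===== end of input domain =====

-- B replaces A's manual index/lookahead while-loop with a single regex-substitution pass (re.sub over '\\(.)').

-- ===== PORT A =====
-- A's while-loop over iIndex, appending to listChars; recursion on the remaining length.
def pvLoopA (cs : List Char) (iIndex : Nat) (acc : List Char) : List Char :=
  if _h : iIndex < cs.length then
    let sChar := cs.getD iIndex ' '
    if sChar = '\\' ∧ iIndex + 1 < cs.length then
      let sNext := cs.getD (iIndex + 1) ' '
      if sNext = 'n' then pvLoopA cs (iIndex + 2) (acc ++ ['\n'])
      else if sNext = '\\' then pvLoopA cs (iIndex + 2) (acc ++ ['\\'])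
      else pvLoopA cs (iIndex + 1) (acc ++ [sChar])
    else pvLoopA cs (iIndex + 1) (acc ++ [sChar])
  else acc
termination_by cs.length - iIndex

def fsUnescapeManifestPath_py (sEscaped : String) : String :=
  String.mk (pvLoopA sEscaped.toList 0 [])

-- ===== PORT B =====
-- re.sub(r"\\(.)", repl, s, flags=DOTALL): scan left to right; each non-overlapping
-- match '\' c is replaced by repl c; unmatched characters (including a lone trailing
-- backslash, which the pattern cannot match) are copied through.
def pvRepl (c : Char) : List Char :=
  if c = 'n' then ['\n'] else if c = '\\' then ['\\'] else ['\\', c]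

def pvSub : List Char → List Char
  | [] => []
  | [c] => [c]
  | c :: c2 :: rest =>
      if c = '\\' then pvRepl c2 ++ pvSub rest else c :: pvSub (c2 :: rest)

def fsUnescapeManifestPath_py_alt (sEscaped : String) : String :=
  String.mk (pvSub sEscaped.toList)

-- ===== PRECONDITION & SPEC =====
def Spec_fsUnescapeManifestPath_py (sEscaped : String) (out : String) : Prop := out = fsUnescapeManifestPath_py_alt sEscaped
instance (sEscaped : String) (out : String) : Decidable (Spec_fsUnescapeManifestPath_py sEscaped out) := by unfold Spec_fsUnescapeManifestPath_py; infer_instance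

-- ===== CLAIM (what is proved, stated in full; the proofs are below) =====
def Claim_equal_fsUnescapeManifestPath_py : Prop := ∀ (sEscaped : String), Dom_fsUnescapeManifestPath_py sEscaped → Spec_fsUnescapeManifestPath_py sEscaped (fsUnescapeManifestPath_py sEscaped)

-- ===== LEMMAS AND PROOFS =====

-- Invariant: the while-loop at position i, with accumulator acc, produces acc followed
-- by the B-pass over the remaining suffix cs.drop i.
theorem pvLoopA_eq_aux (cs : List Char) (n : Nat) :
    ∀ (i : Nat) (acc : List Char), cs.length - i ≤ n →
    pvLoopA cs i acc = acc ++ pvSub (cs.drop i) := by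
  induction n with
  | zero =>
    intro i acc h
    have hi : ¬ i < cs.length := by omega
    rw [pvLoopA, dif_neg hi, List.drop_eq_nil_of_le (by omega)]
    simp [pvSub]
  | succ n ih =>
    intro i acc h
    by_cases hi : i < cs.length
    · have hdrop : cs.drop i = cs[i] :: cs.drop (i + 1) := List.drop_eq_getElem_cons hi
      have hget : cs.getD i ' ' = cs[i] := List.getD_eq_getElem cs ' ' hi
      rw [pvLoopA, dif_pos hi]
      simp only [hget]
      by_cases hb : cs[i] = '\\' ∧ i + 1 < cs.length
      · obtain ⟨hbs, hi1⟩ := hb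
        have hdrop1 : cs.drop (i + 1) = cs[i+1] :: cs.drop (i + 2) :=
          List.drop_eq_getElem_cons hi1
        have hget1 : cs.getD (i + 1) ' ' = cs[i+1] := List.getD_eq_getElem cs ' ' hi1
        rw [if_pos ⟨hbs, hi1⟩]
        simp only [hget1]
        by_cases hn : cs[i+1] = 'n'
        · rw [if_pos hn, ih (i + 2) _ (by omega), hdrop, hdrop1, hbs, hn]
          simp [pvSub, pvRepl]
        · rw [if_neg hn]
          by_cases hb2 : cs[i+1] = '\\'
          · rw [if_pos hb2, ih (i + 2) _ (by omega), hdrop, hdrop1, hbs, hb2]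
            simp [pvSub, pvRepl]
          · rw [if_neg hb2, ih (i + 1) _ (by omega), hdrop, hdrop1, hbs]
            simp [pvSub, pvRepl, hn, hb2]
            rw [hdrop1]
            cases hd : cs.drop (i + 2) <;> simp [pvSub, hb2]
      · rw [if_neg hb, ih (i + 1) _ (by omega), hdrop]
        rcases Decidable.not_and_iff_not_or_not.mp hb with hbs | hi1
        · have hcons : pvSub (cs[i] :: cs.drop (i + 1)) = cs[i] :: pvSub (cs.drop (i + 1)) := by
            cases hd : cs.drop (i + 1) <;> simp [pvSub, hbs]
          rw [hcons]; simp
        · have hlen : cs.drop (i + 1) = [] := List.drop_eq_nil_of_le (by omega)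
          rw [hlen]
          simp [pvSub]
    · rw [pvLoopA, dif_neg hi, List.drop_eq_nil_of_le (by omega)]
      simp [pvSub]

theorem pvLoopA_eq (cs : List Char) : ∀ (iIndex : Nat) (acc : List Char),
    pvLoopA cs iIndex acc = acc ++ pvSub (cs.drop iIndex) := fun i acc =>
  pvLoopA_eq_aux cs (cs.length - i) i acc le_rfl

-- ===== VERDICT (by name: the statement is the Claim_ definition above) =====
theorem fsUnescapeManifestPath_py_spec : Claim_equal_fsUnescapeManifestPath_py := by
  intro s _
  unfold Spec_fsUnescapeManifestPath_py fsUnescapeManifestPath_py fsUnescapeManifestPath_py_alt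
  rw [pvLoopA_eq, List.drop_zero, List.nil_append]
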